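-- pv_equiv track=rewrite | github.com/paul-heyse/CodeAnatomy | src/datafusion_engine/schema_registry.py | _signature_type_validation
-- ===== SOURCE A (Python) =====
-- from collections.abc import Callable, Mapping, Sequence
--
-- def _matches_type(value: str, tokens: frozenset[str]) -> bool:
--     lowered = value.lower()
--     return any(token in lowered for token in tokens)
--
-- def _signature_matches_hints(
--     types: Sequence[str],
--     hints: Sequence[frozenset[str] | None],
-- ) -> bool:
--     if len(types) < len(hints):
--         return False
--     for dtype, tokens in zip(types, hints, strict=False):
--         if tokens is None:
--             continue
--         if not _matches_type(dtype, tokens):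
--             return False
--     return True
--
-- def _signature_has_input_modes(
--     entries: Sequence[tuple[tuple[str, ...], tuple[str, ...]]],
-- ) -> bool:
--     return any(all(mode.lower() == "in" for mode in modes) for _, modes in entries)
--
-- def _signature_matches_required_types(
--     entries: Sequence[tuple[tuple[str, ...], tuple[str, ...]]],
--     hints: Sequence[frozenset[str] | None],
-- ) -> bool:
--     if not hints:
--         return True
--     return any(_signature_matches_hints(types, hints) for types, _ in entries)
--
-- def _signature_type_validation(
--     required: Mapping[str, Sequence[frozenset[str] | None]],
--     signatures: Mapping[str, list[tuple[tuple[str, ...], tuple[str, ...]]]],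
-- ) -> dict[str, list[str]]:
--     missing_types: list[str] = []
--     mode_mismatches: list[str] = []
--     for name, hints in required.items():
--         entries = signatures.get(name.lower())
--         if not entries:
--             continue
--         if not _signature_has_input_modes(entries):
--             mode_mismatches.append(name)
--         if not _signature_matches_required_types(entries, hints):
--             missing_types.append(name)
--     details: dict[str, list[str]] = {}
--     if missing_types:
--         details["type_mismatches"] = missing_types
--     if mode_mismatches:
--         details["mode_mismatches"] = mode_mismatches
--     return details
-- ===== SOURCE B (Python) =====
-- def _signature_type_validation(required, signatures):
--     # Index built once over the signatures: for each signature key, does some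
--     # overload have all-'in' modes?  (removes the per-required-name mode scan)
--     mode_ok = {key: any(all(m.lower() == "in" for m in modes) for _, modes in entries)
--                for key, entries in signatures.items()}
--
--     def _hints_ok(types, hints):
--         # recursive head/tail matcher: True iff enough types and every
--         # non-None hint set has a token contained in the lowered type
--         if not hints:
--             return True
--         if not types:
--             return False
--         head = hints[0]
--         if head is not None and not any(tok in types[0].lower() for tok in head):
--             return False
--         return _hints_ok(types[1:], hints[1:])
--
--     present = [(name, hints, signatures[name.lower()])
--                for name, hints in required.items()
--                if signatures.get(name.lower())]
--     missing_types = [name for name, hints, entries in present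
--                      if hints and not any(_hints_ok(types, hints) for types, _ in entries)]
--     mode_mismatches = [name for name, _h, _e in present
--                        if not mode_ok[name.lower()]]
--     details = {}
--     if missing_types:
--         details["type_mismatches"] = missing_types
--     if mode_mismatches:
--         details["mode_mismatches"] = mode_mismatches
--     return details
-- ===== Notes on version B (the rewrite author's own statement) =====
-- stated objective: alternative
-- what changed: B precomputes a per-signature-key mode-verdict index with one dict comprehension, replaces the length-check+zip hint matcher by a recursive head/tail matcher, and builds the two mismatch lists by a filter-then-comprehension pipeline over a 'present' list instead of A's single loop with helper any()-scans.
import Mathlib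
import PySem

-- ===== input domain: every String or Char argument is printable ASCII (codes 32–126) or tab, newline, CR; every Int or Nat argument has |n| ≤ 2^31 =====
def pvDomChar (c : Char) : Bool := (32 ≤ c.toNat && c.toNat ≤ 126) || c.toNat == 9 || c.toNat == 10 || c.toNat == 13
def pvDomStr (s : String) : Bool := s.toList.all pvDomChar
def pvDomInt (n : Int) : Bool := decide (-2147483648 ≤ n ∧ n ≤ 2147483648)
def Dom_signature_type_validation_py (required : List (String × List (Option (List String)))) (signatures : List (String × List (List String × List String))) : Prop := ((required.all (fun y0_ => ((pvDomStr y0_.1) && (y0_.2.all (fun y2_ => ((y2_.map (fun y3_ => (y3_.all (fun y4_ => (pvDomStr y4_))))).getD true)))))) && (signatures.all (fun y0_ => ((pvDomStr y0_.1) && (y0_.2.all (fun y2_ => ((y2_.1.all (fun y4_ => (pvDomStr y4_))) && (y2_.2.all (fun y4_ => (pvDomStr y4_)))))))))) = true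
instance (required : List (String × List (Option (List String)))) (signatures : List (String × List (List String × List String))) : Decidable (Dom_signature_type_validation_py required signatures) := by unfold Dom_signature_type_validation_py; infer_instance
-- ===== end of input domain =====

-- B precomputes a per-signature-key mode-verdict index, uses a recursive head/tail hint matcher,
-- and builds the mismatch lists by a filter/comprehension pipeline instead of A's single loop with any()-scans.

-- ===== PORT A =====
def pvMatchesType (value : String) (tokens : List String) : Bool :=
  let lowered := PySem.Str.lower value
  tokens.any (fun token => PySem.Str.isIn token lowered)

def pvSignatureMatchesHints (types : List String) (hints : List (Option (List String))) : Bool :=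
  if types.length < hints.length then false
  else (types.zip hints).all (fun p =>
    match p.2 with
    | none => true
    | some tokens => pvMatchesType p.1 tokens)

def pvSignatureHasInputModes (entries : List (List String × List String)) : Bool :=
  entries.any (fun e => e.2.all (fun mode => PySem.Str.lower mode == "in"))

def pvSignatureMatchesRequiredTypes (entries : List (List String × List String)) (hints : List (Option (List String))) : Bool :=
  if hints.isEmpty then true
  else entries.any (fun e => pvSignatureMatchesHints e.1 hints)

-- loop body of A's for-loop, named so the proof can speak about it
def pvStepA (signatures : List (String × List (List String × List String))) (acc : List String × List String) (p : String × List (Option (List String))) : List String × List String :=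
  let entries := ((signatures.find? (fun q => q.1 == PySem.Str.lower p.1)).map Prod.snd).getD []
  if entries.isEmpty then acc
  else
    let acc1 := if !pvSignatureHasInputModes entries then (acc.1, acc.2 ++ [p.1]) else acc
    if !pvSignatureMatchesRequiredTypes entries p.2 then (acc1.1 ++ [p.1], acc1.2) else acc1

def signature_type_validation_py (required : List (String × List (Option (List String)))) (signatures : List (String × List (List String × List String))) : List (String × List String) :=
  let acc := required.foldl (pvStepA signatures) ([], [])
  (if acc.1.isEmpty then [] else [("type_mismatches", acc.1)]) ++
  (if acc.2.isEmpty then [] else [("mode_mismatches", acc.2)])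

-- ===== PORT B =====
-- the dict comprehension: {key: any(all(m.lower()=="in" for m in modes) for _, modes in entries) for key, entries in signatures.items()}
def pvModeOkDict (signatures : List (String × List (List String × List String))) : PySem.Dict String Bool :=
  signatures.foldl
    (fun d p => d.insert p.1 (p.2.any (fun e => e.2.all (fun m => PySem.Str.lower m == "in"))))
    PySem.Dict.empty

-- recursive head/tail matcher _hints_ok
def pvHintsOk : List String → List (Option (List String)) → Bool
  | _, [] => true
  | [], _ :: _ => false
  | t :: ts, h :: hs =>
    (match h with
     | none => true
     | some toks => toks.any (fun tok => PySem.Str.isIn tok (PySem.Str.lower t))) && pvHintsOk ts hs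

-- the 'present' comprehension: names whose lowered key has a non-empty entry list, with hints and entries
def pvPresent (required : List (String × List (Option (List String)))) (signatures : List (String × List (List String × List String))) : List (String × List (Option (List String)) × List (List String × List String)) :=
  required.filterMap (fun p =>
    match (signatures.find? (fun q => q.1 == PySem.Str.lower p.1)).map Prod.snd with
    | none => none
    | some entries => if entries.isEmpty then none else some (p.1, p.2, entries))

def signature_type_validation_py_alt (required : List (String × List (Option (List String)))) (signatures : List (String × List (List String × List String))) : List (String × List String) :=
  let modeOk := pvModeOkDict signatures
  let present := pvPresent required signatures
  let missingTypes := (present.filter (fun t =>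
    !t.2.1.isEmpty && !(t.2.2.any (fun e => pvHintsOk e.1 t.2.1)))).map (·.1)
  let modeMismatches := (present.filter (fun t =>
    !(modeOk.getD (PySem.Str.lower t.1) false))).map (·.1)
  (if missingTypes.isEmpty then [] else [("type_mismatches", missingTypes)]) ++
  (if modeMismatches.isEmpty then [] else [("mode_mismatches", modeMismatches)])

-- ===== PRECONDITION & SPEC =====
-- 'signatures' models a Python Mapping (dict), whose keys are necessarily distinct; an association
-- list with duplicate keys is unrepresentable as A's input, so Pre_ requires its keys to be distinct.
def Pre_signature_type_validation_py (required : List (String × List (Option (List String)))) (signatures : List (String × List (List String × List String))) : Prop :=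
  (signatures.map Prod.fst).Nodup
instance (required : List (String × List (Option (List String)))) (signatures : List (String × List (List String × List String))) : Decidable (Pre_signature_type_validation_py required signatures) := by unfold Pre_signature_type_validation_py; infer_instance

def pvWitness_signature_type_validation_py : (List (String × List (Option (List String)))) × (List (String × List (List String × List String))) :=
  ([("F", [some ["int"], none])], [("f", [(["BigInt", "str"], ["in", "IN"])])])

def Spec_signature_type_validation_py (required : List (String × List (Option (List String)))) (signatures : List (String × List (List String × List String))) (out : List (String × List String)) : Prop := out = signature_type_validation_py_alt required signatures
instance (required : List (String × List (Option (List String)))) (signatures : List (String × List (List String × List String))) (out : List (String × List String)) : Decidable (Spec_signature_type_validation_py required signatures out) := by unfold Spec_signature_type_validation_py; infer_instance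

-- ===== CLAIM =====
def Claim_equal_signature_type_validation_py : Prop := ∀ (required : List (String × List (Option (List String)))) (signatures : List (String × List (List String × List String))), Dom_signature_type_validation_py required signatures → Pre_signature_type_validation_py required signatures → Spec_signature_type_validation_py required signatures (signature_type_validation_py required signatures)

-- ===== LEMMAS AND PROOFS =====

-- the recursive matcher computes A's length-check + zip matcher
theorem pvHintsOk_eq (hints : List (Option (List String))) (types : List String) :
    pvHintsOk types hints = pvSignatureMatchesHints types hints := by
  induction hints generalizing types with
  | nil => cases types <;> simp [pvHintsOk, pvSignatureMatchesHints]
  | cons h hs ih =>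
    cases types with
    | nil => simp [pvHintsOk, pvSignatureMatchesHints]
    | cons t ts =>
      simp only [pvHintsOk, ih ts, pvSignatureMatchesHints, List.zip_cons_cons, List.all_cons]
      by_cases hl : ts.length < hs.length
      · simp [hl]
      · cases h <;> simp [hl, pvMatchesType]

-- a fold of inserts over keys all different from k leaves the lookup at k unchanged
theorem modeOk_foldl_untouched (sigs : List (String × List (List String × List String)))
    (d : PySem.Dict String Bool) (k : String) (hk : ∀ p ∈ sigs, p.1 ≠ k) :
    (sigs.foldl (fun d p => d.insert p.1 (p.2.any (fun e => e.2.all (fun m => PySem.Str.lower m == "in")))) d).getD k false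
      = d.getD k false := by
  induction sigs generalizing d with
  | nil => rfl
  | cons p rest ih =>
    simp only [List.foldl_cons]
    rw [ih _ (fun q hq => hk q (List.mem_cons_of_mem _ hq)),
        PySem.Dict.getD_insert_of_ne _ _ _ (fun h => hk p List.mem_cons_self h.symm)]

-- with distinct keys, looking the index up at k recomputes the verdict on the first-match entries
theorem modeOk_foldl_find (sigs : List (String × List (List String × List String)))
    (d : PySem.Dict String Bool) (k : String) (hnd : (sigs.map Prod.fst).Nodup) :
    (sigs.foldl (fun d p => d.insert p.1 (p.2.any (fun e => e.2.all (fun m => PySem.Str.lower m == "in")))) d).getD k false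
      = ((sigs.find? (fun q => q.1 == k)).map (fun q => pvSignatureHasInputModes q.2)).getD (d.getD k false) := by
  induction sigs generalizing d with
  | nil => rfl
  | cons p rest ih =>
    simp only [List.map_cons, List.nodup_cons] at hnd
    simp only [List.foldl_cons, List.find?_cons]
    by_cases hpk : p.1 = k
    · have hrest : ∀ q ∈ rest, q.1 ≠ k := by
        intro q hq hqk
        apply hnd.1
        rw [hpk, ← hqk]
        exact List.mem_map_of_mem hq
      rw [modeOk_foldl_untouched rest _ k hrest]
      simp [hpk, PySem.Dict.getD_insert_self, pvSignatureHasInputModes]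
    · have hb : (p.1 == k) = false := by simp [hpk]
      simp only [hb]
      rw [ih _ hnd.2, PySem.Dict.getD_insert_of_ne _ _ _ (fun h => hpk h.symm)]

-- A's fold appends exactly B's two filtered lists
theorem foldA_eq (signatures : List (String × List (List String × List String)))
    (hnd : (signatures.map Prod.fst).Nodup)
    (required : List (String × List (Option (List String)))) (m md : List String) :
    required.foldl (pvStepA signatures) (m, md) =
      (m ++ ((pvPresent required signatures).filter (fun t =>
              !t.2.1.isEmpty && !(t.2.2.any (fun e => pvHintsOk e.1 t.2.1)))).map (·.1),
       md ++ ((pvPresent required signatures).filter (fun t =>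
              !((pvModeOkDict signatures).getD (PySem.Str.lower t.1) false))).map (·.1)) := by
  induction required generalizing m md with
  | nil => simp [pvPresent]
  | cons p rest ih =>
    simp only [List.foldl_cons, pvPresent, List.filterMap_cons]
    have hmode : (pvModeOkDict signatures).getD (PySem.Str.lower p.1) false
        = ((signatures.find? (fun q => q.1 == PySem.Str.lower p.1)).map (fun q => pvSignatureHasInputModes q.2)).getD false := by
      unfold pvModeOkDict
      rw [modeOk_foldl_find signatures PySem.Dict.empty (PySem.Str.lower p.1) hnd]
      simp [PySem.Dict.getD_empty]
    cases hfind : signatures.find? (fun q => q.1 == PySem.Str.lower p.1) with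
    | none =>
      simp only [hfind, Option.map_none] at hmode ⊢
      have hstep : pvStepA signatures (m, md) p = (m, md) := by
        simp [pvStepA, hfind]
      rw [hstep, ih m md]
      simp [pvPresent]
    | some q =>
      simp only [hfind, Option.map_some] at hmode ⊢
      by_cases he : q.2.isEmpty
      · have hstep : pvStepA signatures (m, md) p = (m, md) := by
          simp [pvStepA, hfind, he]
        rw [hstep, ih m md]
        simp [he, pvPresent]
      · have hstep : pvStepA signatures (m, md) p =
            (if !pvSignatureMatchesRequiredTypes q.2 p.2 then m ++ [p.1] else m,
             if !pvSignatureHasInputModes q.2 then md ++ [p.1] else md) := by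
          simp only [pvStepA, hfind, Option.map_some, Option.getD_some, he, if_false,
            Bool.false_eq_true]
          split_ifs <;> rfl
        rw [hstep, ih]
        have htype : (!p.2.isEmpty && !(q.2.any (fun e => pvHintsOk e.1 p.2)))
            = !pvSignatureMatchesRequiredTypes q.2 p.2 := by
          unfold pvSignatureMatchesRequiredTypes
          by_cases hh : p.2.isEmpty
          · simp [hh]
          · simp only [hh, if_false, Bool.false_eq_true, Bool.not_false, Bool.true_and]
            congr 1
            congr 1
            funext e
            exact pvHintsOk_eq p.2 e.1
        simp only [he, if_false, Bool.false_eq_true, pvPresent, List.filter_cons,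
          htype, hmode, Option.getD_some]
        split_ifs <;> simp [List.append_assoc]

theorem pvWitness_ok :
    Dom_signature_type_validation_py pvWitness_signature_type_validation_py.1 pvWitness_signature_type_validation_py.2 ∧
    Pre_signature_type_validation_py pvWitness_signature_type_validation_py.1 pvWitness_signature_type_validation_py.2 := by
  decide

-- ===== VERDICT =====
theorem signature_type_validation_py_spec : Claim_equal_signature_type_validation_py := by
  intro required signatures _ hpre
  unfold Spec_signature_type_validation_py signature_type_validation_py signature_type_validation_py_alt
  rw [foldA_eq signatures hpre required [] []]
  rfl
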